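-- pv_equiv track=rewrite | github.com/OnePlanDan/radiodan | tests/conftest.py | _parse_sse_frame
-- ===== SOURCE A (Python) =====
-- def _parse_sse_frame(raw: str) -> dict | None:
--     """Parse a single SSE frame into {event, data}."""
--     event = None
--     data_lines = []
--     for line in raw.strip().split("\n"):
--         if line.startswith("event:"):
--             event = line[len("event:"):].strip()
--         elif line.startswith("data:"):
--             data_lines.append(line[len("data:"):].strip())
--         elif line.startswith(":"):
--             # Comment line (e.g. keepalive)
--             return {"event": "comment", "data": line[1:].strip()}
--     if event is None and not data_lines:
--         return None
--     return {"event": event, "data": "\n".join(data_lines)}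
-- ===== SOURCE B (Python) =====
-- def _parse_sse_frame(raw: str) -> dict | None:
--     """Parse a single SSE frame into {event, data} (comprehension-based re-implementation)."""
--     lines = raw.strip().split("\n")
--     comment = next((l for l in lines if l.startswith(":")), None)
--     if comment is not None:
--         return {"event": "comment", "data": comment[1:].strip()}
--     events = [l[len("event:"):].strip() for l in lines if l.startswith("event:")]
--     data_lines = [l[len("data:"):].strip() for l in lines if l.startswith("data:")]
--     event = events[-1] if events else None
--     if event is None and not data_lines:
--         return None
--     return {"event": event, "data": "\n".join(data_lines)}
-- ===== Notes on version B (the rewrite author's own statement) =====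
-- stated objective: alternative
-- what changed: B replaces A's single stateful loop with early return by a comment pre-scan (first ':' line) plus two comprehension passes that collect all event/data payloads, taking the last event; A's loop and mutable accumulator disappear.
import Mathlib
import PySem

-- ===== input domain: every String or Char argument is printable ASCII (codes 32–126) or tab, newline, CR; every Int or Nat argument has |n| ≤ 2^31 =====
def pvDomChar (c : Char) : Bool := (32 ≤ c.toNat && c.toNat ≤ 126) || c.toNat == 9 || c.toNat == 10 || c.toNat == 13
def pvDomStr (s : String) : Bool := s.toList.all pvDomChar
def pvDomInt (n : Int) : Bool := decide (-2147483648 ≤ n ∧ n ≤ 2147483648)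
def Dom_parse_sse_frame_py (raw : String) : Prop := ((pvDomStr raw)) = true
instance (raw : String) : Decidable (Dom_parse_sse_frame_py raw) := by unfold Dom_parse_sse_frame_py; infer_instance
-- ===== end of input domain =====

-- B replaces A's stateful loop (early return on a comment line) by a comment pre-scan plus
-- two comprehension passes (all event payloads, last one wins; all data payloads); alternative decomposition, same cost.

-- shared with both ports: raw.strip().split("\n"), and line[len(prefix):].strip()
def pvEvVal (l : List Char) : String := String.ofList (PySem.Chars.strip (PySem.List.slice l (some 6) none))
def pvDaVal (l : List Char) : String := String.ofList (PySem.Chars.strip (PySem.List.slice l (some 5) none))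
def pvCmVal (l : List Char) : String := String.ofList (PySem.Chars.strip (PySem.List.slice l (some 1) none))

-- ===== PORT A =====
def pvLoopA : List (List Char) → Option String → List (List Char) → Option (List (String × Option String))
  | [], event, dataLines =>
      if event.isNone && dataLines.isEmpty then none
      else some [("event", event), ("data", some (String.ofList (PySem.Chars.join ['\n'] dataLines)))]
  | l :: ls, event, dataLines =>
      if PySem.Chars.startswith l ['e','v','e','n','t',':'] then
        pvLoopA ls (some (pvEvVal l)) dataLines
      else if PySem.Chars.startswith l ['d','a','t','a',':'] then
        pvLoopA ls event (dataLines ++ [(pvDaVal l).toList])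
      else if PySem.Chars.startswith l [':'] then
        some [("event", some "comment"), ("data", some (pvCmVal l))]
      else pvLoopA ls event dataLines

def parse_sse_frame_py (raw : String) : Option (List (String × Option String)) :=
  pvLoopA (PySem.Chars.splitOn (PySem.Chars.strip raw.toList) ['\n']) none []

-- ===== PORT B =====
def parse_sse_frame_py_alt (raw : String) : Option (List (String × Option String)) :=
  let lines := PySem.Chars.splitOn (PySem.Chars.strip raw.toList) ['\n']
  match lines.find? (fun l => PySem.Chars.startswith l [':']) with
  | some c => some [("event", some "comment"), ("data", some (pvCmVal c))]
  | none =>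
      let events := (lines.filter (fun l => PySem.Chars.startswith l ['e','v','e','n','t',':'])).map pvEvVal
      let dataLines := (lines.filter (fun l => PySem.Chars.startswith l ['d','a','t','a',':'])).map (fun l => (pvDaVal l).toList)
      let event := events.getLast?
      if event.isNone && dataLines.isEmpty then none
      else some [("event", event), ("data", some (String.ofList (PySem.Chars.join ['\n'] dataLines)))]

-- ===== PRECONDITION & SPEC =====
def Spec_parse_sse_frame_py (raw : String) (out : Option (List (String × Option String))) : Prop := out = parse_sse_frame_py_alt raw
instance (raw : String) (out : Option (List (String × Option String))) : Decidable (Spec_parse_sse_frame_py raw out) := by unfold Spec_parse_sse_frame_py; infer_instance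

-- ===== CLAIM (what is proved, stated in full; the proofs are below) =====
def Claim_equal_parse_sse_frame_py : Prop := ∀ (raw : String), Dom_parse_sse_frame_py raw → Spec_parse_sse_frame_py raw (parse_sse_frame_py raw)

-- ===== LEMMAS AND PROOFS =====

lemma pv_sw_head {a b : Char} (hab : a ≠ b) {as : List Char} (bs l : List Char)
    (h : PySem.Chars.startswith l (a :: as) = true) :
    PySem.Chars.startswith l (b :: bs) = false := by
  rw [PySem.Chars.startswith_iff] at h
  by_contra hc
  rw [Bool.not_eq_false, PySem.Chars.startswith_iff] at hc
  obtain ⟨t1, h1⟩ := h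
  obtain ⟨t2, h2⟩ := hc
  rw [← h1] at h2
  exact hab (by simpa using congrArg (List.head? ·) h2.symm)

lemma pv_loopA_eq (ls : List (List Char)) (e : Option String) (d : List (List Char)) :
    pvLoopA ls e d =
    match ls.find? (fun l => PySem.Chars.startswith l [':']) with
    | some c => some [("event", some "comment"), ("data", some (pvCmVal c))]
    | none =>
        let ev := ((ls.filter (fun l => PySem.Chars.startswith l ['e','v','e','n','t',':'])).map pvEvVal).getLast?.or e
        let da := d ++ (ls.filter (fun l => PySem.Chars.startswith l ['d','a','t','a',':'])).map (fun l => (pvDaVal l).toList)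
        if ev.isNone && da.isEmpty then none
        else some [("event", ev), ("data", some (String.ofList (PySem.Chars.join ['\n'] da)))] := by
  induction ls generalizing e d with
  | nil => simp [pvLoopA]
  | cons l ls ih =>
    by_cases hE : PySem.Chars.startswith l ['e','v','e','n','t',':'] = true
    · have hC : PySem.Chars.startswith l [':'] = false :=
        pv_sw_head (by decide) _ l hE
      have hD : PySem.Chars.startswith l ['d','a','t','a',':'] = false :=
        pv_sw_head (by decide) _ l hE
      simp only [pvLoopA, hE, hD, if_true, List.find?_cons, hC, List.filter_cons,
        Bool.false_eq_true, if_false, List.map_cons, ih]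
      cases hF : ls.find? (fun l => PySem.Chars.startswith l [':']) with
      | some c => simp
      | none => simp [List.getLast?_cons]
    · by_cases hD : PySem.Chars.startswith l ['d','a','t','a',':'] = true
      · have hC : PySem.Chars.startswith l [':'] = false :=
          pv_sw_head (by decide) _ l hD
        rw [Bool.not_eq_true] at hE
        simp only [pvLoopA, hE, hD, if_true, Bool.false_eq_true, if_false, List.find?_cons, hC,
          List.filter_cons, List.map_cons, ih]
        cases hF : ls.find? (fun l => PySem.Chars.startswith l [':']) with
        | some c => simp
        | none => simp [List.append_assoc]
      · rw [Bool.not_eq_true] at hE hD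
        by_cases hC : PySem.Chars.startswith l [':'] = true
        · simp only [pvLoopA, hE, hD, hC, Bool.false_eq_true, if_false, if_true, List.find?_cons]
        · rw [Bool.not_eq_true] at hC
          simp only [pvLoopA, hE, hD, hC, Bool.false_eq_true, if_false, List.find?_cons,
            List.filter_cons, ih]

-- ===== VERDICT (by name: the statement is the Claim_ definition above) =====
theorem parse_sse_frame_py_spec : Claim_equal_parse_sse_frame_py := by
  intro raw _
  unfold Spec_parse_sse_frame_py parse_sse_frame_py parse_sse_frame_py_alt
  rw [pv_loopA_eq]
  simp only [Option.or_none, List.nil_append]
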